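-- pv_equiv track=rewrite | github.com/EchoCog/rwkvml | cognitive_grammar/adapters/__init__.py | _extract_scheme_expressions
-- ===== SOURCE A (Python) =====
-- from typing import Dict, List, Any, Optional, Tuple
--
-- def _extract_scheme_expressions(text: str) -> List[str]:
--     """Extract individual Scheme expressions from text"""
--     expressions = []
--     current_expr = ""
--     paren_depth = 0
--     in_expression = False
--
--     for char in text:
--         if char == '(' and not in_expression:
--             in_expression = True
--             current_expr = char
--             paren_depth = 1
--         elif char == '(' and in_expression:
--             current_expr += char
--             paren_depth += 1
--         elif char == ')' and in_expression:
--             current_expr += char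
--             paren_depth -= 1
--             if paren_depth == 0:
--                 expressions.append(current_expr.strip())
--                 current_expr = ""
--                 in_expression = False
--         elif in_expression:
--             current_expr += char
--
--     return expressions
-- ===== SOURCE B (Python) =====
-- from typing import List
--
-- def _extract_scheme_expressions(text: str) -> List[str]:
--     """Extract individual Scheme expressions from text (index/slice scan)."""
--     expressions = []
--     depth = 0
--     start = 0
--     for i, char in enumerate(text):
--         if char == '(':
--             if depth == 0:
--                 start = i
--             depth += 1
--         elif char == ')' and depth > 0:
--             depth -= 1
--             if depth == 0:
--                 expressions.append(text[start:i + 1])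
--     return expressions
-- ===== Notes on version B (the rewrite author's own statement) =====
-- stated objective: alternative
-- what changed: B replaces A's per-character accumulation of the current expression string (plus in_expression flag and final strip) with a single index/depth scan that records the start index of each top-level '(' and slices the input once per balanced expression.
import Mathlib
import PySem

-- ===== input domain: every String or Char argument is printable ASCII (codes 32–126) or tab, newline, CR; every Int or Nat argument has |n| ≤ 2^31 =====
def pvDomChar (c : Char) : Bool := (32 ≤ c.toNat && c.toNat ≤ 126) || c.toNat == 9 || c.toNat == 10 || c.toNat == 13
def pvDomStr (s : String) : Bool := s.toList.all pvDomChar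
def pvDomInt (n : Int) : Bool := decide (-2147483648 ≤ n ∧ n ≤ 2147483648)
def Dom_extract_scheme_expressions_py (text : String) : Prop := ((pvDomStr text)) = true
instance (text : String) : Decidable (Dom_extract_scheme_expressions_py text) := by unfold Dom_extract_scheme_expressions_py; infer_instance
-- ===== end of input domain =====

-- B replaces A's per-character string accumulation with an index/depth scan that slices the
-- input once per balanced expression (objective: alternative algorithm, same cost).

-- ===== PORT A =====
-- loop body of A: state (expressions, current_expr, paren_depth, in_expression)
def pvStepA (st : List String × List Char × Int × Bool) (ch : Char) :
    List String × List Char × Int × Bool :=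
  match st with
  | (es, cur, d, inE) =>
    if ch = '(' ∧ inE = false then (es, [ch], 1, true)
    else if ch = '(' ∧ inE = true then (es, cur ++ [ch], d + 1, true)
    else if ch = ')' ∧ inE = true then
      if d - 1 = 0 then
        (es ++ [String.ofList (PySem.Chars.strip (cur ++ [ch]))], [], d - 1, false)
      else (es, cur ++ [ch], d - 1, true)
    else if inE = true then (es, cur ++ [ch], d, true)
    else (es, cur, d, inE)

def extract_scheme_expressions_py (text : String) : List String :=
  (text.toList.foldl pvStepA ([], [], 0, false)).1

-- ===== PORT B =====
-- loop body of B: state (expressions, depth, start); p = (i, char) from enumerate(text)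
def pvStepB (text : String) (st : List String × Int × Int) (p : Int × Char) :
    List String × Int × Int :=
  match st, p with
  | (es, depth, start), (i, ch) =>
    if ch = '(' then (es, depth + 1, if depth = 0 then i else start)
    else if ch = ')' ∧ 0 < depth then
      if depth - 1 = 0 then
        (es ++ [PySem.Str.slice text (some start) (some (i + 1))], depth - 1, start)
      else (es, depth - 1, start)
    else (es, depth, start)

def extract_scheme_expressions_py_alt (text : String) : List String :=
  ((PySem.List.enumerate text.toList 0).foldl (pvStepB text) ([], 0, 0)).1

-- ===== PRECONDITION & SPEC =====
def Spec_extract_scheme_expressions_py (text : String) (out : List String) : Prop := out = extract_scheme_expressions_py_alt text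
instance (text : String) (out : List String) : Decidable (Spec_extract_scheme_expressions_py text out) := by unfold Spec_extract_scheme_expressions_py; infer_instance

-- ===== CLAIM (what is proved, stated in full; the proofs are below) =====
def Claim_equal_extract_scheme_expressions_py : Prop := ∀ (text : String), Dom_extract_scheme_expressions_py text → Spec_extract_scheme_expressions_py text (extract_scheme_expressions_py text)

-- ===== LEMMAS AND PROOFS =====

-- strip is a no-op on a string that starts with '(' and ends with ')'
lemma pv_strip_noop (t : List Char) :
    PySem.Chars.strip ('(' :: t ++ [')']) = '(' :: t ++ [')'] := by
  have h1 : '(' :: t ++ [')'] = '(' :: (t ++ [')']) := by simp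
  rw [h1]
  unfold PySem.Chars.strip PySem.Chars.lstrip PySem.Chars.rstrip
  rw [List.dropWhile_cons]
  simp only [show PySem.Chars.isspace '(' = false from rfl, Bool.false_eq_true, if_false]
  rw [show ('(' :: (t ++ [')'])).reverse = ')' :: (t.reverse ++ ['(']) by simp]
  rw [List.dropWhile_cons]
  simp [show PySem.Chars.isspace ')' = false from rfl]

lemma pv_take_drop_closed (pre cs' : List Char) (c : Char) (s : Nat) (hs : s ≤ pre.length) :
    List.take (pre.length + 1 - s) (List.drop s (pre ++ c :: cs')) = pre.drop s ++ [c] := by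
  rw [List.drop_append_of_le_length hs, List.take_append]
  have h1 : (pre.drop s).length = pre.length - s := by simp
  rw [List.take_of_length_le (by omega)]
  congr 1
  have h2 : pre.length + 1 - s - (pre.drop s).length = 1 := by omega
  rw [h2]
  rfl

-- the expression string B slices out equals the string A accumulated
lemma pv_slice_eq (text : String) (pre cs' : List Char) (c : Char) (s : Nat)
    (hs : s ≤ pre.length) (h : text.toList = pre ++ c :: cs') :
    PySem.Str.slice text (some (s : Int)) (some ((pre.length : Int) + 1)) =
      String.ofList (pre.drop s ++ [c]) := by
  apply String.toList_inj.mp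
  rw [PySem.Str.toList_slice, PySem.Chars.slice_eq_listSlice, h]
  have hb : ((pre.length : Int) + 1) = ((pre.length + 1 : Nat) : Int) := by push_cast; ring
  rw [hb, PySem.List.slice_natCast, pv_take_drop_closed pre cs' c s hs, String.toList_ofList]

-- main loop invariant: A's fold and B's fold (from matching mid-states) return the same
-- expression list.  d is the common depth; when 0 < d, A's current_expr is pre.drop s where
-- s = B's start index, and it begins with '('.
lemma pv_loop (text : String) (cs : List Char) : ∀ (pre : List Char) (es : List String)
    (d : Nat) (cur : List Char) (st : Int),
    text.toList = pre ++ cs →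
    ((d = 0 ∧ cur = []) ∨
      (0 < d ∧ ∃ s : Nat, st = (s : Int) ∧ s ≤ pre.length ∧ cur = pre.drop s ∧
        ∃ t, cur = '(' :: t)) →
    (cs.foldl pvStepA (es, cur, (d : Int), decide (0 < d))).1
      = ((PySem.List.enumerate cs (pre.length : Int)).foldl (pvStepB text) (es, (d : Int), st)).1 := by
  induction cs with
  | nil => intro pre es d cur st h hinv; simp [PySem.List.enumerate]
  | cons c cs' ih =>
    intro pre es d cur st h hinv
    rw [PySem.List.enumerate_cons, List.foldl_cons, List.foldl_cons]
    have hpre' : text.toList = (pre ++ [c]) ++ cs' := by simpa using h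
    have hlen' : ((pre ++ [c]).length : Int) = (pre.length : Int) + 1 := by
      simp
    rcases hinv with ⟨hd0, hcur⟩ | ⟨hdpos, s, hst, hsle, hcur, t, hht⟩
    · -- not in an expression (depth 0)
      subst hd0; subst hcur
      by_cases hc1 : c = '('
      · subst hc1
        have hA : pvStepA (es, [], ((0:Nat) : Int), decide (0 < 0)) '(' = (es, ['('], 1, true) := by
          simp [pvStepA]
        have hB : pvStepB text (es, ((0:Nat) : Int), st) ((pre.length : Int), '(') =
            (es, 1, (pre.length : Int)) := by simp [pvStepB]
        rw [hA, hB]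
        have := ih (pre ++ ['(']) es 1 ['('] ((pre.length : Int)) hpre'
          (Or.inr ⟨one_pos, pre.length, rfl, by simp, by simp, [], rfl⟩)
        simpa [hlen'] using this
      · have hA : pvStepA (es, [], ((0:Nat) : Int), decide (0 < 0)) c = (es, [], 0, false) := by
          simp [pvStepA, hc1]
        have hB : pvStepB text (es, ((0:Nat) : Int), st) ((pre.length : Int), c) =
            (es, 0, st) := by simp [pvStepB, hc1]
        rw [hA, hB]
        have := ih (pre ++ [c]) es 0 [] st hpre' (Or.inl ⟨rfl, rfl⟩)
        simpa [hlen'] using this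
    · -- inside an expression (depth d > 0)
      have hinE : decide (0 < d) = true := by simpa using hdpos
      by_cases hc1 : c = '('
      · subst hc1
        have hA : pvStepA (es, cur, (d : Int), decide (0 < d)) '(' =
            (es, cur ++ ['('], (d : Int) + 1, true) := by
          simp [pvStepA, hinE]
        have hB : pvStepB text (es, (d : Int), st) ((pre.length : Int), '(') =
            (es, (d : Int) + 1, st) := by simp [pvStepB]; omega
        rw [hA, hB]
        have := ih (pre ++ ['(']) es (d + 1) (cur ++ ['(']) st hpre'
          (Or.inr ⟨Nat.succ_pos d, s, hst, by simp; omega,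
            by rw [List.drop_append_of_le_length hsle, hcur], t ++ ['('], by rw [hht]; simp⟩)
        have hcast : ((d + 1 : Nat) : Int) = (d : Int) + 1 := by push_cast; ring
        have hdec : decide (0 < d + 1) = true := by simp
        rw [hcast, hdec, hlen'] at this
        simpa [hlen'] using this
      · by_cases hc2 : c = ')'
        · subst hc2
          by_cases hd1 : d = 1
          · subst hd1
            have hA : pvStepA (es, cur, ((1:Nat) : Int), decide (0 < 1)) ')' =
                (es ++ [String.ofList (PySem.Chars.strip (cur ++ [')']))], [], 0, false) := by
              simp [pvStepA, hc1]
            have hB : pvStepB text (es, ((1:Nat) : Int), st) ((pre.length : Int), ')') =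
                (es ++ [PySem.Str.slice text (some st) (some ((pre.length : Int) + 1))], 0, st) := by
              simp [pvStepB, hc1]
            have heq : PySem.Str.slice text (some st) (some ((pre.length : Int) + 1)) =
                String.ofList (PySem.Chars.strip (cur ++ [')'])) := by
              rw [hst, pv_slice_eq text pre cs' ')' s hsle h, ← hcur, hht, pv_strip_noop]
            rw [hA, hB, heq]
            have := ih (pre ++ [')'])
              (es ++ [String.ofList (PySem.Chars.strip (cur ++ [')']))]) 0 [] st hpre'
              (Or.inl ⟨rfl, rfl⟩)
            simpa [hlen'] using this
          · have hdm : ((d : Nat) : Int) - 1 ≠ 0 := by omega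
            have hA : pvStepA (es, cur, (d : Int), decide (0 < d)) ')' =
                (es, cur ++ [')'], (d : Int) - 1, true) := by
              simp [pvStepA, hc1, hinE, hdm]
            have hB : pvStepB text (es, (d : Int), st) ((pre.length : Int), ')') =
                (es, (d : Int) - 1, st) := by
              simp [pvStepB, hc1, hdm]
              omega
            rw [hA, hB]
            have := ih (pre ++ [')']) es (d - 1) (cur ++ [')']) st hpre'
              (Or.inr ⟨by omega, s, hst, by simp; omega,
                by rw [List.drop_append_of_le_length hsle, hcur], t ++ [')'], by rw [hht]; simp⟩)
            have hcast : ((d - 1 : Nat) : Int) = (d : Int) - 1 := by omega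
            have hdec : decide (0 < d - 1) = true := by simp; omega
            rw [hcast, hdec, hlen'] at this
            simpa [hlen'] using this
        · have hA : pvStepA (es, cur, (d : Int), decide (0 < d)) c =
              (es, cur ++ [c], (d : Int), true) := by
            simp [pvStepA, hc1, hc2, hinE]
          have hB : pvStepB text (es, (d : Int), st) ((pre.length : Int), c) =
              (es, (d : Int), st) := by simp [pvStepB, hc1, hc2]
          rw [hA, hB]
          have := ih (pre ++ [c]) es d (cur ++ [c]) st hpre'
            (Or.inr ⟨hdpos, s, hst, by simp; omega,
              by rw [List.drop_append_of_le_length hsle, hcur], t ++ [c], by rw [hht]; simp⟩)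
          rw [hinE, hlen'] at this
          simpa [hlen'] using this

-- ===== VERDICT (by name: the statement is the Claim_ definition above) =====
theorem extract_scheme_expressions_py_spec : Claim_equal_extract_scheme_expressions_py := by
  intro text _
  unfold Spec_extract_scheme_expressions_py extract_scheme_expressions_py extract_scheme_expressions_py_alt
  have := pv_loop text text.toList [] [] 0 [] 0 (by simp) (Or.inl ⟨rfl, rfl⟩)
  simpa using this
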